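-- pv_equiv track=rewrite | github.com/machine-teaching-group/tmlr2024_neurtasksyn | src/taskgen/feature_processors.py | reach_start
-- ===== SOURCE A (Python) =====
-- def reach_start(string: str):
--     counter = 0
--     new_string = ""
--     for c in string[::-1]:
--         if c == ']':
--             counter += 1
--         elif c == '[':
--             counter -= 1
--         if counter < 0:
--             break
--         new_string += c
--
--     return new_string[::-1]
-- ===== SOURCE B (Python) =====
-- def reach_start(string: str):
--     stack = []
--     for i, c in enumerate(string):
--         if c == '[':
--             stack.append(i)
--         elif c == ']' and stack:
--             stack.pop()
--     cut = stack[-1] if stack else -1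
--     return string[cut + 1:]
-- ===== Notes on version B (the rewrite author's own statement) =====
-- stated objective: faster
-- what changed: Replaces the reversed scan with character-by-character string accumulation by a single forward pass maintaining a stack of unmatched open-bracket indices, then one slice after the rightmost unmatched open bracket.
import Mathlib
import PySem

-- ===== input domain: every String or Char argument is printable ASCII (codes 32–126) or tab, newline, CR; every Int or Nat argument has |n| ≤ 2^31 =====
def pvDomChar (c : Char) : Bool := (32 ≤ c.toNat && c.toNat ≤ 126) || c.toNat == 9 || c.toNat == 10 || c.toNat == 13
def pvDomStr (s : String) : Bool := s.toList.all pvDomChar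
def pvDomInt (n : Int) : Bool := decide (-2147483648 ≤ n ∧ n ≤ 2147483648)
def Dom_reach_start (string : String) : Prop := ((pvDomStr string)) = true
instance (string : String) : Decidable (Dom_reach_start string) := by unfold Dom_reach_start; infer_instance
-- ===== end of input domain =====

-- B replaces A's reversed scan with string accumulation by a forward pass keeping a
-- stack of unmatched '[' indices and a single final slice (objective: alternative).

-- ===== PORT A =====
-- loop 'for c in string[::-1]' with counter and accumulated new_string, break when counter < 0
-- (string[::-1] is the reversed character list: PySem.Str.slice?_none_none_neg_one)
def reachGoA (counter : Int) (acc : List Char) : List Char → List Char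
  | [] => acc
  | c :: rest =>
    let counter' := if c = ']' then counter + 1 else if c = '[' then counter - 1 else counter
    if counter' < 0 then acc else reachGoA counter' (acc ++ [c]) rest

def reach_start (string : String) : String :=
  String.mk ((reachGoA 0 [] string.toList.reverse).reverse)

-- ===== PORT B =====
-- forward pass: push index of '[', pop on ']' when the stack is non-empty
-- (Python appends/pops at the list's end; here the stack top is the list head)
def reachGoB (stack : List Int) (i : Int) : List Char → List Int
  | [] => stack
  | c :: rest =>
    reachGoB (if c = '[' then i :: stack
              else if c = ']' ∧ stack ≠ [] then stack.drop 1
              else stack) (i + 1) rest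

def reach_start_alt (string : String) : String :=
  let st := reachGoB [] 0 string.toList
  let cut := st.headD (-1)
  -- string[cut+1:] : cut + 1 ≥ 0 always (cut is an index or -1), so drop is exact
  String.mk (string.toList.drop (cut + 1).toNat)

-- ===== PRECONDITION & SPEC =====
def Spec_reach_start (string : String) (out : String) : Prop := out = reach_start_alt string
instance (string : String) (out : String) : Decidable (Spec_reach_start string out) := by unfold Spec_reach_start; infer_instance

-- ===== CLAIM (what is proved, stated in full; the proofs are below) =====
def Claim_equal_reach_start : Prop := ∀ (string : String), Dom_reach_start string → Spec_reach_start string (reach_start string)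

-- ===== LEMMAS AND PROOFS =====

-- accumulator-free rephrasing of A's loop
def reachGoA' (counter : Int) : List Char → List Char
  | [] => []
  | c :: rest =>
    let counter' := if c = ']' then counter + 1 else if c = '[' then counter - 1 else counter
    if counter' < 0 then [] else c :: reachGoA' counter' rest

theorem reachGoA'_cons (k : Int) (c : Char) (r : List Char) :
    reachGoA' k (c :: r)
      = if (if c = ']' then k + 1 else if c = '[' then k - 1 else k) < 0 then []
        else c :: reachGoA' (if c = ']' then k + 1 else if c = '[' then k - 1 else k) r := rfl

theorem reachGoA_eq_acc (l : List Char) : ∀ (k : Int) (acc : List Char),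
    reachGoA k acc l = acc ++ reachGoA' k l := by
  induction l with
  | nil => intro k acc; simp [reachGoA, reachGoA']
  | cons c rest ih =>
    intro k acc
    simp only [reachGoA, reachGoA'_cons]
    by_cases h : (if c = ']' then k + 1 else if c = '[' then k - 1 else k) < 0
    · rw [if_pos h, if_pos h]; simp
    · rw [if_neg h, if_neg h, ih]; simp

-- the stack update of one character (pop = drop 1, equal to B's guarded pop)
def stepB (st : List Int) (j : Int) (c : Char) : List Int :=
  if c = '[' then j :: st else if c = ']' then st.drop 1 else st

theorem reachGoB_snoc (l : List Char) : ∀ (st : List Int) (i : Int) (c : Char),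
    reachGoB st i (l ++ [c]) = stepB (reachGoB st i l) (i + l.length) c := by
  induction l with
  | nil =>
    intro st i c
    rcases st with _ | ⟨x, st'⟩ <;> by_cases h1 : c = '[' <;> by_cases h2 : c = ']' <;>
      simp_all [reachGoB, stepB]
  | cons d rest ih =>
    intro st i c
    simp only [List.cons_append, reachGoB, ih, List.length_cons]
    have h : i + 1 + (rest.length : Int) = i + ((rest.length + 1 : Nat) : Int) := by
      push_cast; ring
    rw [h]

-- all stack entries are previously-seen indices
theorem reachGoB_mem (l : List Char) : ∀ (st : List Int) (i : Int),
    ∀ j ∈ reachGoB st i l, j ∈ st ∨ (i ≤ j ∧ j < i + l.length) := by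
  induction l with
  | nil => intro st i j hj; simp [reachGoB] at hj; exact Or.inl hj
  | cons c rest ih =>
    intro st i j hj
    simp only [reachGoB] at hj
    rcases ih _ _ j hj with h | h
    · split at h
      · rcases List.mem_cons.1 h with rfl | h'
        · right
          refine ⟨le_refl _, ?_⟩
          simp only [List.length_cons]
          push_cast; omega
        · exact Or.inl h'
      · split at h
        · exact Or.inl (List.mem_of_mem_drop h)
        · exact Or.inl h
    · right; simp only [List.length_cons]; push_cast; omega

theorem reachGoB_bounds (l : List Char) (j : Int) (hj : j ∈ reachGoB [] 0 l) :
    0 ≤ j ∧ j < l.length := by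
  rcases reachGoB_mem l [] 0 j hj with h | h
  · simp at h
  · omega

-- cut index with the k rightmost unmatched '[' forgiven
def idxB (k : Nat) (l : List Char) : Nat :=
  match (reachGoB [] 0 l).drop k with
  | [] => 0
  | j :: _ => (j + 1).toNat

theorem idxB_le (k : Nat) (l : List Char) : idxB k l ≤ l.length := by
  unfold idxB
  rcases h : (reachGoB [] 0 l).drop k with _ | ⟨j, t⟩
  · simp
  · have hm : j ∈ reachGoB [] 0 l := List.mem_of_mem_drop (h ▸ List.mem_cons_self ..)
    have hb := reachGoB_bounds l j hm
    show (j + 1).toNat ≤ l.length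
    omega

-- main invariant: A's reverse scan with initial counter k returns the suffix after
-- the (k+1)-th rightmost unmatched '[' found by B's forward stack
theorem main_inv (r : List Char) : ∀ (k : Nat),
    (reachGoA' (k : Int) r).reverse = r.reverse.drop (idxB k r.reverse) := by
  induction r with
  | nil => intro k; simp [reachGoA', idxB, reachGoB]
  | cons c r' ih =>
    intro k
    have hsnoc := reachGoB_snoc r'.reverse [] 0 c
    have hdropapp : ∀ t : Nat, t ≤ r'.reverse.length →
        (r'.reverse ++ [c]).drop t = r'.reverse.drop t ++ [c] := by
      intro t ht; rw [List.drop_append_of_le_length ht]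
    by_cases hc1 : c = ']'
    · -- counter increases; B pops one entry
      subst hc1
      rw [reachGoA'_cons]
      simp only [reduceIte, Char.reduceEq]
      rw [if_neg (by omega)]
      have hcast : (k : Int) + 1 = ((k + 1 : Nat) : Int) := by push_cast; ring
      rw [hcast]
      simp only [List.reverse_cons, ih (k + 1)]
      have hidx : idxB k (r'.reverse ++ [']']) = idxB (k + 1) r'.reverse := by
        unfold idxB
        rw [hsnoc]
        have : stepB (reachGoB [] 0 r'.reverse) (0 + r'.reverse.length) ']'
            = (reachGoB [] 0 r'.reverse).drop 1 := by simp [stepB]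
        rw [this, List.drop_drop, Nat.add_comm 1 k]
      rw [hidx, hdropapp _ (idxB_le _ _)]
    · by_cases hc2 : c = '['
      · -- counter decreases; B pushes the position of c
        subst hc2
        rcases k with _ | k''
        · -- break immediately: result is empty; B cuts after the last position
          rw [reachGoA'_cons]
          simp only [reduceIte, Char.reduceEq, Nat.cast_zero]
          rw [if_pos (by omega)]
          have hidx : idxB 0 (r'.reverse ++ ['[']) = r'.reverse.length + 1 := by
            unfold idxB
            rw [hsnoc]
            have : stepB (reachGoB [] 0 r'.reverse) (0 + r'.reverse.length) '['
                = (0 + (r'.reverse.length : Int)) :: reachGoB [] 0 r'.reverse := by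
              simp [stepB]
            rw [this, List.drop_zero]
            show ((0 : Int) + r'.reverse.length + 1).toNat = r'.reverse.length + 1
            omega
          simp only [List.reverse_cons, List.reverse_nil, hidx]
          rw [List.drop_eq_nil_of_le (by simp)]
        · rw [reachGoA'_cons]
          simp only [reduceIte, Char.reduceEq]
          rw [if_neg (by push_cast; omega)]
          have hcast : ((k'' + 1 : Nat) : Int) - 1 = ((k'' : Nat) : Int) := by
            push_cast; ring
          rw [hcast]
          simp only [List.reverse_cons, ih k'']
          have hidx : idxB (k'' + 1) (r'.reverse ++ ['[']) = idxB k'' r'.reverse := by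
            unfold idxB
            rw [hsnoc]
            have : stepB (reachGoB [] 0 r'.reverse) (0 + r'.reverse.length) '['
                = (0 + (r'.reverse.length : Int)) :: reachGoB [] 0 r'.reverse := by
              simp [stepB]
            rw [this, List.drop_succ_cons]
          rw [hidx, hdropapp _ (idxB_le _ _)]
      · -- counter and stack unchanged
        rw [reachGoA'_cons]
        rw [if_neg hc1, if_neg hc2, if_neg (by omega)]
        simp only [List.reverse_cons, ih k]
        have hidx : idxB k (r'.reverse ++ [c]) = idxB k r'.reverse := by
          unfold idxB
          rw [hsnoc]
          have : stepB (reachGoB [] 0 r'.reverse) (0 + r'.reverse.length) c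
              = reachGoB [] 0 r'.reverse := by simp [stepB, hc1, hc2]
          rw [this]
        rw [hidx, hdropapp _ (idxB_le _ _)]

theorem idxB_zero (l : List Char) :
    idxB 0 l = ((reachGoB [] 0 l).headD (-1) + 1).toNat := by
  unfold idxB
  rcases h : reachGoB [] 0 l with _ | ⟨j, t⟩ <;> simp

-- ===== VERDICT (by name: the statement is the Claim_ definition above) =====
theorem reach_start_spec : Claim_equal_reach_start := by
  intro s _
  unfold Spec_reach_start reach_start reach_start_alt
  rw [reachGoA_eq_acc, List.nil_append]
  have h := main_inv s.toList.reverse 0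
  simp only [List.reverse_reverse, Int.natCast_zero] at h
  rw [h, idxB_zero]
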